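-- pv_equiv track=rewrite | github.com/loesxje/Vision | FASE2/boundingBoxesSim.py | allBoundingBoxes
-- ===== SOURCE A (Python) =====
-- def allBoundingBoxes(contourvector):
--     #argument contourvector comes from makeContourImage
--
--     #for i in size(findNextBlob):
--         #calc min_x & min_y from the contour of every Blob
--         #calc max_x & max_y from the contour of every Blob
--     bbs = []
--
--
--     for i in range(len(contourvector)):
--         allRow = []
--         allCol = []
--         blobContour = contourvector[i]
--         for rowColIndex in range(len(blobContour)):
--             allRow.append(blobContour[rowColIndex][0])
--             allCol.append(blobContour[rowColIndex][1])
--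
--         minRow = min(allRow)
--         maxRow = max(allRow)
--
--         minCol = min(allCol)
--         maxCol = max(allCol)
--         minCor = (minRow, minCol)
--         maxCor = (maxRow, maxCol)
-- # =============================================================================
-- #         minCor = (bbox._min[0], bbox._min[1]) #tuple(minRow, minCol)
-- #         maxCor = (bbox._max[0], bbox._max[1]) #tuple(maxRow, maxCol)
-- # =============================================================================
--         bbs.append([minCor, maxCor])
--     return bbs
-- ===== SOURCE B (Python) =====
-- def allBoundingBoxes(contourvector):
--     # One pass per contour: track running min/max of rows and cols.
--     bbs = []
--     for blob in contourvector:
--         (minRow, minCol) = blob[0]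
--         maxRow, maxCol = minRow, minCol
--         for (r, c) in blob[1:]:
--             if r < minRow: minRow = r
--             if c < minCol: minCol = c
--             if r > maxRow: maxRow = r
--             if c > maxCol: maxCol = c
--         bbs.append([(minRow, minCol), (maxRow, maxCol)])
--     return bbs
-- ===== Notes on version B (the rewrite author's own statement) =====
-- stated objective: simpler
-- what changed: Per contour, replaced building two coordinate lists plus four separate min/max scans with a single pass over the points that maintains the four running extremes seeded from the first point.
-- outside the precondition, e.g. on allBoundingBoxes([[]]): A raises ValueError, B raises IndexError
import Mathlib
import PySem

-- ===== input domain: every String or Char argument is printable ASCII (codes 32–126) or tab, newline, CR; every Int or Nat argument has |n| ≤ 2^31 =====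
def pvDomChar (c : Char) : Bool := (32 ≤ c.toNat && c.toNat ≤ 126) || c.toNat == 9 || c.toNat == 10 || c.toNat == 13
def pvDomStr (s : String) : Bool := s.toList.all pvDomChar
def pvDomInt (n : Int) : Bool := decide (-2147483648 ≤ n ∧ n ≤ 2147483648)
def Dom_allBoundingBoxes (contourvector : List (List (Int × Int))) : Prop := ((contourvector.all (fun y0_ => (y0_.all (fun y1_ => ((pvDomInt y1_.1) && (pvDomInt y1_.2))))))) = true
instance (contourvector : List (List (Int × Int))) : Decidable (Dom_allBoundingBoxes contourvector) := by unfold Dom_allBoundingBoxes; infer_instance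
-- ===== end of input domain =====

-- B replaces A's per-contour "build two coordinate lists, then four min/max scans" by a
-- single pass maintaining four running extremes (objective: simpler).

-- ===== PORT A =====
-- literal transliteration: index loop over contourvector; pvStepA is one iteration of the
-- outer loop: inner index loop appending to allRow/allCol, then min/max of each list
-- (min/max of [] is Python's ValueError: the `none` branches, excluded by Pre_).
def pvStepA (bbs : List (List (Int × Int))) (blobContour : List (Int × Int)) : List (List (Int × Int)) :=
  let rc := (PySem.List.pyRange 0 (PySem.List.len blobContour)).foldl
      (fun (p : List Int × List Int) j =>
        let pt := PySem.List.pyGetD blobContour j ((0 : Int), (0 : Int))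
        (p.1 ++ [pt.1], p.2 ++ [pt.2])) ([], [])
  match PySem.List.min? rc.1 (fun y => y), PySem.List.max? rc.1 (fun y => y),
        PySem.List.min? rc.2 (fun y => y), PySem.List.max? rc.2 (fun y => y) with
  | some minRow, some maxRow, some minCol, some maxCol =>
      bbs ++ [[(minRow, minCol), (maxRow, maxCol)]]
  | _, _, _, _ => bbs

def allBoundingBoxes (contourvector : List (List (Int × Int))) : List (List (Int × Int)) :=
  (PySem.List.pyRange 0 (PySem.List.len contourvector)).foldl
    (fun bbs i => pvStepA bbs (PySem.List.pyGetD contourvector i []))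
    []

-- ===== PORT B =====
-- per-contour single pass tracking (minRow, minCol, maxRow, maxCol), seeded from the
-- first point; an empty contour raises in Source B (IndexError at blob[0]) — outside Pre_.
def pvBoxB (blob : List (Int × Int)) : List (Int × Int) :=
  match blob with
  | [] => []
  | p :: rest =>
    let s := rest.foldl
      (fun (s : Int × Int × Int × Int) q =>
        (min s.1 q.1, min s.2.1 q.2, max s.2.2.1 q.1, max s.2.2.2 q.2))
      (p.1, p.2, p.1, p.2)
    [(s.1, s.2.1), (s.2.2.1, s.2.2.2)]

def allBoundingBoxes_alt (contourvector : List (List (Int × Int))) : List (List (Int × Int)) :=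
  contourvector.map pvBoxB

-- ===== PRECONDITION & SPEC =====
-- Pre_ excludes contour lists containing an empty contour: there Python A raises
-- ValueError (min of an empty sequence).
def Pre_allBoundingBoxes (contourvector : List (List (Int × Int))) : Prop :=
  ∀ blob ∈ contourvector, blob ≠ []
instance (contourvector : List (List (Int × Int))) : Decidable (Pre_allBoundingBoxes contourvector) := by unfold Pre_allBoundingBoxes; infer_instance
def pvWitness_allBoundingBoxes : (List (List (Int × Int))) := [[(1, 2), (0, 5)], [(3, 3)]]

def Spec_allBoundingBoxes (contourvector : List (List (Int × Int))) (out : List (List (Int × Int))) : Prop := out = allBoundingBoxes_alt contourvector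
instance (contourvector : List (List (Int × Int))) (out : List (List (Int × Int))) : Decidable (Spec_allBoundingBoxes contourvector out) := by unfold Spec_allBoundingBoxes; infer_instance

-- ===== CLAIM (what is proved, stated in full; the proofs are below) =====
def Claim_equal_allBoundingBoxes : Prop := ∀ (contourvector : List (List (Int × Int))), Dom_allBoundingBoxes contourvector → Pre_allBoundingBoxes contourvector → Spec_allBoundingBoxes contourvector (allBoundingBoxes contourvector)

-- ===== LEMMAS AND PROOFS =====

-- A's inner loop builds the two projection lists.
theorem pvPairBuild (blob : List (Int × Int)) (a b : List Int) :
    blob.foldl (fun (p : List Int × List Int) pt => (p.1 ++ [pt.1], p.2 ++ [pt.2])) (a, b)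
      = (a ++ blob.map Prod.fst, b ++ blob.map Prod.snd) := by
  induction blob generalizing a b with
  | nil => simp
  | cons q t ih => simp [List.foldl_cons, ih]

-- B's fold computes the four running extremes componentwise.
theorem pvQuad (rest : List (Int × Int)) (a b c d : Int) :
    rest.foldl
      (fun (s : Int × Int × Int × Int) q =>
        (min s.1 q.1, min s.2.1 q.2, max s.2.2.1 q.1, max s.2.2.2 q.2)) (a, b, c, d)
      = ((rest.map Prod.fst).foldl min a, (rest.map Prod.snd).foldl min b,
         (rest.map Prod.fst).foldl max c, (rest.map Prod.snd).foldl max d) := by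
  induction rest generalizing a b c d with
  | nil => simp
  | cons q t ih => simp [List.foldl_cons, ih]

-- per-contour agreement on a nonempty contour
theorem pvStep (blob : List (Int × Int)) (h : blob ≠ []) (bbs : List (List (Int × Int))) :
    pvStepA bbs blob = bbs ++ [pvBoxB blob] := by
  obtain ⟨p, rest, rfl⟩ := List.exists_cons_of_ne_nil h
  unfold pvStepA
  rw [PySem.List.foldl_pyRange_zero_pyGetD (p :: rest) ((0 : Int), (0 : Int))
      (fun (acc : List Int × List Int) pt => (acc.1 ++ [pt.1], acc.2 ++ [pt.2])) ([], [])]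
  rw [pvPairBuild]
  simp only [List.nil_append, List.map_cons, PySem.List.min?_id_cons, PySem.List.max?_id_cons]
  simp only [pvBoxB]
  rw [pvQuad]

-- ===== VERDICT (by name: the statement is the Claim_ definition above) =====
theorem allBoundingBoxes_spec : Claim_equal_allBoundingBoxes := by
  intro cv _ hpre
  unfold Spec_allBoundingBoxes allBoundingBoxes allBoundingBoxes_alt
  rw [PySem.List.foldl_pyRange_zero_pyGetD cv [] pvStepA []]
  rw [PySem.List.foldl_congr_mem cv _ (fun bbs blob => bbs ++ [pvBoxB blob]) []
      (fun bbs blob hmem => pvStep blob (hpre blob hmem) bbs)]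
  exact (PySem.List.foldl_append_singleton_eq_map pvBoxB cv []).trans (by simp)
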